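-- pv_equiv track=rewrite | github.com/rapveen/Interviews_09_24 | stripe/coding_R1/CompressString.py | compress_part_one
-- ===== SOURCE A (Python) =====
-- def compress_part_one(s: str) -> str:
--     # Split into major parts using '/'
--     major_parts = s.split('/')
--
--     # Process each major part
--     compressed_major_parts = []
--     for major_part in major_parts:
--         # Split into minor parts using '.'
--         minor_parts = major_part.split('.')
--
--         # Process each minor part
--         compressed_minor_parts = []
--         for minor_part in minor_parts:
--             # Get first and last letter
--             first = minor_part[0]
--             last = minor_part[-1]
--             # Count middle letters
--             middle_count = len(minor_part) - 2
--             # Create compressed version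
--             compressed = f"{first}{middle_count}{last}"
--             compressed_minor_parts.append(compressed)
--
--         # Join minor parts with dots
--         compressed_major = '.'.join(compressed_minor_parts)
--         compressed_major_parts.append(compressed_major)
--
--     # Join major parts with slashes
--     return '/'.join(compressed_major_parts)
-- ===== SOURCE B (Python) =====
-- def compress_part_one(s: str) -> str:
--     # Single left-to-right scan: compress each segment at a delimiter or at the end,
--     # keeping the delimiters verbatim, instead of nested split/join passes.
--     pieces = []
--     seg = ''
--     for ch in s:
--         if ch == '/' or ch == '.':
--             pieces.append(seg[0] + str(len(seg) - 2) + seg[-1])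
--             pieces.append(ch)
--             seg = ''
--         else:
--             seg += ch
--     pieces.append(seg[0] + str(len(seg) - 2) + seg[-1])
--     return ''.join(pieces)
-- ===== Notes on version B (the rewrite author's own statement) =====
-- stated objective: alternative
-- what changed: Replaces A's nested split('/')/split('.')/join passes with a single left-to-right scan that compresses each segment when a delimiter or the end of the string is reached, emitting delimiters verbatim.
import Mathlib
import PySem

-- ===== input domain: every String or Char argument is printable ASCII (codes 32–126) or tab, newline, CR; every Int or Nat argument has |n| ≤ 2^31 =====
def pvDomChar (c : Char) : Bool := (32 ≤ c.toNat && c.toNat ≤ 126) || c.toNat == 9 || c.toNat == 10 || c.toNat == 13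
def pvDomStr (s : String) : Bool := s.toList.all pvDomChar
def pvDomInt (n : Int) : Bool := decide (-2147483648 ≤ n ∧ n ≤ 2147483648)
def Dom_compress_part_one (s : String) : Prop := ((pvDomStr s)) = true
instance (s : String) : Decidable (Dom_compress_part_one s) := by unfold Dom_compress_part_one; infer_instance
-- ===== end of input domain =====

-- B replaces A's nested split('/')/split('.')/join passes by a single left-to-right scan
-- that compresses each segment in place and keeps the delimiters verbatim (objective: alternative).

-- ===== PORT A =====
-- minor_part[0], minor_part[-1], f"{first}{len-2}{last}"; [] stands for the IndexError case, excluded by Pre_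
def pvCompressA (minor_part : List Char) : List Char :=
  match PySem.List.pyGet? minor_part 0, PySem.List.pyGet? minor_part (-1) with
  | some first, some last => [first] ++ PySem.Int.toChars ((minor_part.length : Int) - 2) ++ [last]
  | _, _ => []

def compress_part_one (s : String) : String :=
  let major_parts := PySem.Chars.splitOn s.toList ['/']
  let compressed_major_parts := major_parts.foldl (fun acc major_part =>
    let minor_parts := PySem.Chars.splitOn major_part ['.']
    let compressed_minor_parts :=
      minor_parts.foldl (fun acc2 minor_part => acc2 ++ [pvCompressA minor_part]) []
    acc ++ [PySem.Chars.join ['.'] compressed_minor_parts]) []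
  String.ofList (PySem.Chars.join ['/'] compressed_major_parts)

-- ===== PORT B =====
def pvIsDelim (ch : Char) : Bool := ch == '/' || ch == '.'

-- seg[0] + str(len(seg)-2) + seg[-1]; [] stands for the IndexError case, excluded by Pre_
def pvCompressB (seg : List Char) : List Char :=
  match PySem.List.pyGet? seg 0, PySem.List.pyGet? seg (-1) with
  | some first, some last => [first] ++ PySem.Int.toChars ((seg.length : Int) - 2) ++ [last]
  | _, _ => []

-- the for-loop of B: current segment `seg`, output list `pieces`
def pvScanB : List Char → List Char → List (List Char) → List (List Char)
  | [], seg, pieces => pieces ++ [pvCompressB seg]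
  | ch :: rest, seg, pieces =>
    if pvIsDelim ch then pvScanB rest [] (pieces ++ [pvCompressB seg, [ch]])
    else pvScanB rest (seg ++ [ch]) pieces

def compress_part_one_alt (s : String) : String :=
  String.ofList (PySem.Chars.join [] (pvScanB s.toList [] []))

-- ===== PRECONDITION & SPEC =====
-- Pre_ excludes exactly the inputs where Python A raises IndexError: strings in which some
-- '/'- or '.'-separated segment is empty (empty string, leading/trailing delimiter, adjacent delimiters).
def pvOkTail : List Char → Bool
  | [] => true
  | [c] => !(c == '/' || c == '.')
  | a :: b :: rest => !((a == '/' || a == '.') && (b == '/' || b == '.')) && pvOkTail (b :: rest)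

def Pre_compress_part_one (s : String) : Prop :=
  (match s.toList with
   | [] => false
   | c :: _ => !(c == '/' || c == '.')) = true ∧ pvOkTail s.toList = true
instance (s : String) : Decidable (Pre_compress_part_one s) := by unfold Pre_compress_part_one; infer_instance

def pvWitness_compress_part_one : String := "ab.c/d"

def Spec_compress_part_one (s : String) (out : String) : Prop := out = compress_part_one_alt s
instance (s : String) (out : String) : Decidable (Spec_compress_part_one s out) := by unfold Spec_compress_part_one; infer_instance

-- ===== CLAIM (what is proved, stated in full; the proofs are below) =====
def Claim_equal_compress_part_one : Prop := ∀ (s : String), Dom_compress_part_one s → Pre_compress_part_one s → Spec_compress_part_one s (compress_part_one s)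

-- ===== LEMMAS AND PROOFS =====

-- clean recursive single-character split (reference form of Python's str.split)
def pvSp (d : Char) : List Char → List (List Char)
  | [] => [[]]
  | c :: rest => if c == d then [] :: pvSp d rest else (pvSp d rest).modifyHead (c :: ·)

theorem pvSp_ne_nil (d : Char) (l : List Char) : pvSp d l ≠ [] := by
  induction l with
  | nil => simp [pvSp]
  | cons c rest ih =>
    simp only [pvSp]
    split
    · simp
    · intro h; exact ih (List.modifyHead_eq_nil_iff.mp h)

theorem pvGo_eq (d : Char) (fuel : Nat) (l cur : List Char) (acc : List (List Char))
    (h : l.length < fuel) :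
    PySem.Chars.splitOn.go [d] fuel l cur acc
      = acc.reverse ++ (pvSp d l).modifyHead (cur.reverse ++ ·) := by
  induction fuel generalizing l cur acc with
  | zero => omega
  | succ fuel ih =>
    cases l with
    | nil =>
      rw [PySem.Chars.splitOn.go.eq_def]
      simp [pvSp]
    | cons c rest =>
      rw [PySem.Chars.splitOn.go.eq_def]
      simp only [List.isPrefixOf, Bool.and_true]
      by_cases hc : c = d
      · subst hc
        simp only [beq_self_eq_true, if_pos]
        have hdrop : List.drop [c].length (c :: rest) = rest := by simp
        rw [hdrop, ih rest [] (cur.reverse :: acc) (by simpa using Nat.lt_of_succ_lt_succ h)]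
        simp only [pvSp, beq_self_eq_true, if_pos, List.modifyHead_cons, List.reverse_cons,
          List.append_assoc, List.singleton_append]
        obtain ⟨hd, tl, hsp⟩ := List.exists_cons_of_ne_nil (pvSp_ne_nil c rest)
        simp [hsp]
      · rw [if_neg (by simp; exact fun h => hc h.symm)]
        rw [ih rest (c :: cur) acc (by simpa using Nat.lt_of_succ_lt_succ h)]
        obtain ⟨hd, tl, hsp⟩ := List.exists_cons_of_ne_nil (pvSp_ne_nil d rest)
        have hcd : (c == d) = false := by simp [hc]
        simp [pvSp, hsp, hcd]

theorem pvSplitOn_eq (d : Char) (l : List Char) :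
    PySem.Chars.splitOn l [d] = pvSp d l := by
  unfold PySem.Chars.splitOn
  rw [pvGo_eq d (l.length + 1) l [] [] (by omega)]
  obtain ⟨hd, tl, hsp⟩ := List.exists_cons_of_ne_nil (pvSp_ne_nil d l)
  simp [hsp]

-- reference single-pass recursion both ports are reduced to
def pvG : List Char → List Char → List Char
  | [], seg => pvCompressA seg
  | c :: rest, seg =>
    if pvIsDelim c then pvCompressA seg ++ [c] ++ pvG rest [] else pvG rest (seg ++ [c])

def pvgA (mp : List Char) : List Char :=
  PySem.Chars.join ['.'] ((pvSp '.' mp).map pvCompressA)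

def pvAA (l : List Char) : List Char :=
  PySem.Chars.join ['/'] ((pvSp '/' l).map pvgA)

theorem pvSp_free (d : Char) (seg : List Char) (h : ∀ c ∈ seg, (c == d) = false) :
    pvSp d seg = [seg] := by
  induction seg with
  | nil => rfl
  | cons c rest ih =>
    have hc := h c (by simp)
    simp [pvSp, hc, ih (fun x hx => h x (by simp [hx]))]

theorem pvSp_append_free (d : Char) (seg l : List Char) (h : ∀ c ∈ seg, (c == d) = false) :
    pvSp d (seg ++ l) = (pvSp d l).modifyHead (seg ++ ·) := by
  induction seg with
  | nil =>
    obtain ⟨hd, tl, hsp⟩ := List.exists_cons_of_ne_nil (pvSp_ne_nil d l)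
    simp [hsp]
  | cons c rest ih =>
    have hc := h c (by simp)
    have := ih (fun x hx => h x (by simp [hx]))
    obtain ⟨hd, tl, hsp⟩ := List.exists_cons_of_ne_nil (pvSp_ne_nil d l)
    simp_all [pvSp]

theorem pvJoin_head_append (sep x y : List Char) (t : List (List Char)) :
    PySem.Chars.join sep ((x ++ y) :: t) = x ++ PySem.Chars.join sep (y :: t) := by
  cases t with
  | nil => simp [PySem.Chars.join_singleton]
  | cons q r => rw [PySem.Chars.join_cons_cons, PySem.Chars.join_cons_cons]; simp [List.append_assoc]

theorem pvAA_key (l : List Char) : ∀ seg, (∀ c ∈ seg, pvIsDelim c = false) →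
    pvAA (seg ++ l) = pvG l seg := by
  induction l with
  | nil =>
    intro seg hseg
    have hslash : ∀ c ∈ seg, (c == '/') = false := by
      intro c hc; have := hseg c hc; simp [pvIsDelim] at this; simp [this.1]
    have hdot : ∀ c ∈ seg, (c == '.') = false := by
      intro c hc; have := hseg c hc; simp [pvIsDelim] at this; simp [this.2]
    simp [pvAA, pvG, pvgA, pvSp_free '/' seg hslash, pvSp_free '.' seg hdot,
      PySem.Chars.join_singleton]
  | cons c rest ih =>
    intro seg hseg
    have hslash : ∀ x ∈ seg, (x == '/') = false := by
      intro x hx; have := hseg x hx; simp [pvIsDelim] at this; simp [this.1]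
    have hdot : ∀ x ∈ seg, (x == '.') = false := by
      intro x hx; have := hseg x hx; simp [pvIsDelim] at this; simp [this.2]
    by_cases hc : c = '/'
    · subst hc
      obtain ⟨hd, tl, hsp⟩ := List.exists_cons_of_ne_nil (pvSp_ne_nil '/' rest)
      have h1 : pvSp '/' (seg ++ '/' :: rest) = seg :: hd :: tl := by
        rw [pvSp_append_free '/' seg ('/' :: rest) hslash]
        simp [pvSp, hsp]
      have h2 : pvAA rest = pvG rest [] := by
        have := ih [] (by simp); simpa using this
      simp only [pvAA, h1, List.map_cons, PySem.Chars.join_cons_cons, pvG, pvIsDelim,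
        beq_self_eq_true, Bool.true_or, if_pos]
      rw [← h2]
      simp [pvAA, pvgA, pvSp_free '.' seg hdot, PySem.Chars.join_singleton, hsp]
    · by_cases hc2 : c = '.'
      · subst hc2
        obtain ⟨hd, tl, hsp⟩ := List.exists_cons_of_ne_nil (pvSp_ne_nil '/' rest)
        have hfree : ∀ x ∈ seg ++ ['.'], (x == '/') = false := by
          intro x hx
          rcases List.mem_append.mp hx with h | h
          · exact hslash x h
          · simp at h; subst h; decide
        have h1 : pvSp '/' (seg ++ '.' :: rest) = (seg ++ '.' :: hd) :: tl := by
          have : seg ++ '.' :: rest = (seg ++ ['.']) ++ rest := by simp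
          rw [this, pvSp_append_free '/' (seg ++ ['.']) rest hfree, hsp]
          simp
        have hg : pvgA (seg ++ '.' :: hd) = pvCompressA seg ++ ['.'] ++ pvgA hd := by
          obtain ⟨h2, t2, hsp2⟩ := List.exists_cons_of_ne_nil (pvSp_ne_nil '.' hd)
          unfold pvgA
          rw [pvSp_append_free '.' seg ('.' :: hd) hdot]
          simp only [pvSp, beq_self_eq_true, if_pos, List.modifyHead_cons, List.append_nil,
            hsp2, List.map_cons, PySem.Chars.join_cons_cons]
        have h2 : pvAA rest = pvG rest [] := by
          have := ih [] (by simp); simpa using this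
        have hgoal : pvG ('.' :: rest) seg = pvCompressA seg ++ ['.'] ++ pvG rest [] := by
          simp [pvG, pvIsDelim]
        rw [hgoal, ← h2]
        unfold pvAA
        rw [h1, List.map_cons, hg, List.append_assoc, pvJoin_head_append, pvJoin_head_append,
          hsp, List.map_cons]
        simp [List.append_assoc]
      · have hstep : pvG (c :: rest) seg = pvG rest (seg ++ [c]) := by
          simp [pvG, pvIsDelim, hc, hc2]
        have hfree : ∀ x ∈ seg ++ [c], pvIsDelim x = false := by
          intro x hx
          rcases List.mem_append.mp hx with h | h
          · exact hseg x h
          · simp at h; subst h; simp [pvIsDelim, hc, hc2]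
        rw [hstep, ← ih (seg ++ [c]) hfree]
        simp

theorem pvJoin_empty (parts : List (List Char)) :
    PySem.Chars.join [] parts = parts.flatten := by
  induction parts with
  | nil => simp [PySem.Chars.join_nil]
  | cons p rest ih =>
    cases rest with
    | nil => simp [PySem.Chars.join_singleton]
    | cons q r => rw [PySem.Chars.join_cons_cons]; simp_all

theorem pvScanB_flat (l : List Char) : ∀ seg pieces,
    (pvScanB l seg pieces).flatten = pieces.flatten ++ pvG l seg := by
  induction l with
  | nil => intro seg pieces; simp [pvScanB, pvG, pvCompressB, pvCompressA]
  | cons c rest ih =>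
    intro seg pieces
    by_cases hc : pvIsDelim c = true
    · simp [pvScanB, pvG, hc, ih, pvCompressB, pvCompressA]
    · simp only [Bool.not_eq_true] at hc
      simp [pvScanB, pvG, hc, ih]

theorem pvPorts_agree (s : String) : compress_part_one s = compress_part_one_alt s := by
  unfold compress_part_one compress_part_one_alt
  simp only [PySem.List.foldl_append_singleton_eq_map, List.nil_append,
    pvSplitOn_eq, pvJoin_empty, pvScanB_flat]
  have : (pvSp '/' s.toList).map
      (fun mp => PySem.Chars.join ['.'] ((pvSp '.' mp).map pvCompressA))
      = (pvSp '/' s.toList).map pvgA := by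
    simp [pvgA]
  rw [this]
  have := pvAA_key s.toList [] (by simp)
  simp only [List.nil_append] at this
  rw [← this]
  rfl

-- ===== VERDICT (by name: the statement is the Claim_ definition above) =====
theorem compress_part_one_spec : Claim_equal_compress_part_one := by
  intro s _ _
  unfold Spec_compress_part_one
  exact pvPorts_agree s
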